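-- pv_equiv track=rewrite | github.com/DuvanFelipeDeveloper/DamasMinMaxQ | MinMax.py | buscar_parejas_mayor_valor
-- ===== SOURCE A (Python) =====
-- def buscar_parejas_mayor_valor(vector):
--     parejas = []
--     for tupla in vector:
--         diferencia = abs(tupla[0][0] - tupla[1][0])
--         parejas.append((tupla, diferencia))
--     parejas.sort(key=lambda x: x[1], reverse=True)
--     max_dif = parejas[0][1]
--     return [x[0] for x in parejas if x[1] == max_dif]
-- ===== SOURCE B (Python) =====
-- def buscar_parejas_mayor_valor(vector):
--     mejor = abs(vector[0][0][0] - vector[0][1][0])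
--     resultado = [vector[0]]
--     for tupla in vector[1:]:
--         diferencia = abs(tupla[0][0] - tupla[1][0])
--         if diferencia > mejor:
--             mejor = diferencia
--             resultado = [tupla]
--         elif diferencia == mejor:
--             resultado.append(tupla)
--     return resultado
-- ===== Notes on version B (the rewrite author's own statement) =====
-- stated objective: alternative
-- what changed: Replaces build-pairs + stable descending sort + filter with a single running-maximum pass that keeps the current best group in encounter order.
import Mathlib
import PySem

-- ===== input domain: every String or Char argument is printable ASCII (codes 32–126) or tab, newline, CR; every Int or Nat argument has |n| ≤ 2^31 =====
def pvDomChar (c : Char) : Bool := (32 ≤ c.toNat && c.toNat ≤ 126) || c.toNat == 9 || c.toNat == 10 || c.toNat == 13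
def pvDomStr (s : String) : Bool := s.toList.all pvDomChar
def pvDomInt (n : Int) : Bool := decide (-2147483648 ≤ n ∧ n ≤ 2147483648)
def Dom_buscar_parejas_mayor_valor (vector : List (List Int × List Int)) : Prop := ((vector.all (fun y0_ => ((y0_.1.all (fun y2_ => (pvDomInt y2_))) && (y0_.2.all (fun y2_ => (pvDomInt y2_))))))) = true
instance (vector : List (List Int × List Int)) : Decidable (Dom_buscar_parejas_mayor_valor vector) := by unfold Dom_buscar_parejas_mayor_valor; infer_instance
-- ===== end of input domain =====

-- B replaces A's build-pairs + stable-descending-sort + filter with a single running-maximum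
-- pass (objective: alternative); return values agree on every input A accepts (Pre_ below).

-- abs(tupla[0][0] - tupla[1][0]); total via pyGetD, exact under Pre_ (both inner lists nonempty)
def pvDiff (t : List Int × List Int) : Int :=
  |PySem.List.pyGetD t.1 0 0 - PySem.List.pyGetD t.2 0 0|

-- ===== PORT A =====
def buscar_parejas_mayor_valor (vector : List (List Int × List Int)) : List (List Int × List Int) :=
  -- parejas = []; for tupla in vector: parejas.append((tupla, diferencia));
  -- parejas.sort(key=lambda x: x[1], reverse=True)
  match PySem.List.sorted (vector.foldl (fun acc tupla => acc ++ [(tupla, pvDiff tupla)]) [])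
      (fun x => x.2) true with
  | [] => []  -- parejas[0] raises IndexError (empty vector); excluded by Pre_
  | m :: tl =>
    -- max_dif = parejas[0][1]; [x[0] for x in parejas if x[1] == max_dif]
    ((m :: tl).filter (fun x => x.2 == m.2)).map (fun x => x.1)

-- ===== PORT B =====
def pvAltLoop : List (List Int × List Int) → Int → List (List Int × List Int) → List (List Int × List Int)
  | [], _, resultado => resultado
  | tupla :: rest, mejor, resultado =>
    let d := pvDiff tupla
    if mejor < d then pvAltLoop rest d [tupla]
    else if d == mejor then pvAltLoop rest mejor (resultado ++ [tupla])
    else pvAltLoop rest mejor resultado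

def buscar_parejas_mayor_valor_alt (vector : List (List Int × List Int)) : List (List Int × List Int) :=
  match vector with
  | [] => []  -- vector[0] raises IndexError; excluded by Pre_
  | t :: rest => pvAltLoop rest (pvDiff t) [t]

-- ===== PRECONDITION & SPEC =====
-- Pre_ excludes exactly the inputs where A raises IndexError: an empty vector (parejas[0]),
-- or a pair with an empty coordinate list (tupla[0][0] / tupla[1][0]).
def Pre_buscar_parejas_mayor_valor (vector : List (List Int × List Int)) : Prop :=
  vector ≠ [] ∧ ∀ t ∈ vector, t.1 ≠ [] ∧ t.2 ≠ []
instance (vector : List (List Int × List Int)) : Decidable (Pre_buscar_parejas_mayor_valor vector) := by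
  unfold Pre_buscar_parejas_mayor_valor; infer_instance

def pvWitness_buscar_parejas_mayor_valor : (List (List Int × List Int)) := [([0], [3]), ([2], [-1]), ([5], [2])]

def Spec_buscar_parejas_mayor_valor (vector : List (List Int × List Int)) (out : List (List Int × List Int)) : Prop := out = buscar_parejas_mayor_valor_alt vector
instance (vector : List (List Int × List Int)) (out : List (List Int × List Int)) : Decidable (Spec_buscar_parejas_mayor_valor vector out) := by unfold Spec_buscar_parejas_mayor_valor; infer_instance

-- ===== CLAIM (what is proved, stated in full; the proofs are below) =====
def Claim_equal_buscar_parejas_mayor_valor : Prop := ∀ (vector : List (List Int × List Int)), Dom_buscar_parejas_mayor_valor vector → Pre_buscar_parejas_mayor_valor vector → Spec_buscar_parejas_mayor_valor vector (buscar_parejas_mayor_valor vector)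

-- ===== LEMMAS AND PROOFS =====

-- running maximum used to characterise B's loop
def pvMax (l : List (List Int × List Int)) (b : Int) : Int :=
  l.foldl (fun a t => max a (pvDiff t)) b

theorem pvMax_bounds (l : List (List Int × List Int)) (b : Int) :
    b ≤ pvMax l b ∧ ∀ t ∈ l, pvDiff t ≤ pvMax l b := by
  induction l generalizing b with
  | nil => simp [pvMax]
  | cons t l ih =>
    rcases ih (max b (pvDiff t)) with ⟨h1, h2⟩
    refine ⟨le_trans (le_max_left _ _) h1, ?_⟩
    intro u hu
    rcases List.mem_cons.mp hu with hu | hu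
    · subst hu; exact le_trans (le_max_right b (pvDiff u)) h1
    · exact h2 u hu

theorem pvMax_attained (l : List (List Int × List Int)) (b : Int) :
    pvMax l b = b ∨ ∃ t ∈ l, pvMax l b = pvDiff t := by
  induction l generalizing b with
  | nil => simp [pvMax]
  | cons t l ih =>
    rcases ih (max b (pvDiff t)) with h | ⟨u, hu, hequ⟩
    · rcases le_total (pvDiff t) b with hle | hle
      · left; simpa [pvMax, max_eq_left hle] using h
      · right
        exact ⟨t, List.mem_cons_self, by simpa [pvMax, max_eq_right hle] using h⟩
    · right; exact ⟨u, List.mem_cons_of_mem _ hu, hequ⟩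

-- B's loop returns the elements attaining the running maximum, in encounter order
theorem pvAltLoop_char (l : List (List Int × List Int)) :
    ∀ (b : Int) (res : List (List Int × List Int)),
    pvAltLoop l b res =
      (if pvMax l b = b then res else []) ++ l.filter (fun t => pvDiff t == pvMax l b) := by
  induction l with
  | nil => intro b res; simp [pvAltLoop, pvMax]
  | cons t l ih =>
    intro b res
    have hMax : pvMax (t :: l) b = pvMax l (max b (pvDiff t)) := rfl
    rcases lt_trichotomy b (pvDiff t) with hlt | heq | hgt
    · -- diferencia > mejor
      have hstep : pvMax (t :: l) b = pvMax l (pvDiff t) := by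
        rw [hMax, max_eq_right hlt.le]
      have hb : pvDiff t ≤ pvMax l (pvDiff t) := (pvMax_bounds l (pvDiff t)).1
      have hne : pvMax l (pvDiff t) ≠ b := by omega
      rw [show pvAltLoop (t :: l) b res = pvAltLoop l (pvDiff t) [t] by
            simp [pvAltLoop, hlt],
          ih (pvDiff t) [t], hstep, if_neg hne]
      by_cases hd : pvMax l (pvDiff t) = pvDiff t
      · have ht : (pvDiff t == pvMax l (pvDiff t)) = true := by simp [hd]
        simp [hd, List.filter_cons, ht]
      · have ht : (pvDiff t == pvMax l (pvDiff t)) = false := by simp; omega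
        simp [hd, List.filter_cons, ht]
    · -- diferencia == mejor
      have hstep : pvMax (t :: l) b = pvMax l b := by
        rw [hMax, ← heq, max_self]
      rw [show pvAltLoop (t :: l) b res = pvAltLoop l b (res ++ [t]) by
            simp [pvAltLoop, ← heq],
          ih b (res ++ [t]), hstep]
      by_cases hd : pvMax l b = b
      · have ht : (pvDiff t == pvMax l b) = true := by
          rw [hd]; exact beq_iff_eq.mpr heq.symm
        simp [List.filter_cons, hd, ← heq]
      · have hgt' : b < pvMax l b :=
          lt_of_le_of_ne (pvMax_bounds l b).1 (fun h => hd h.symm)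
        have ht : (pvDiff t == pvMax l b) = false := by simp; omega
        simp [hd, List.filter_cons, ht]
    · -- diferencia < mejor
      have hstep : pvMax (t :: l) b = pvMax l b := by
        rw [hMax, max_eq_left hgt.le]
      have hb := (pvMax_bounds l b).1
      rw [show pvAltLoop (t :: l) b res = pvAltLoop l b res by
            simp [pvAltLoop, not_lt.mpr hgt.le, Int.ne_of_lt hgt],
          ih b res, hstep]
      have ht : (pvDiff t == pvMax l b) = false := by simp; omega
      simp [List.filter_cons, ht]

-- stability of the descending insertion: filtering by any key value commutes with insertBy
theorem pv_filter_insertBy_ne {α : Type} (key : α → Int) (c : Int) (x : α) (ys : List α)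
    (hx : key x ≠ c) :
    (PySem.List.insertBy (fun a b => decide (key b < key a)) x ys).filter
        (fun z => key z == c) =
      ys.filter (fun z => key z == c) := by
  induction ys with
  | nil => simp [PySem.List.insertBy, hx]
  | cons y ys ih =>
    rw [PySem.List.insertBy]
    split_ifs with h
    · simp [List.filter_cons, hx]
    · simp [List.filter_cons, ih]

theorem pv_filter_insertBy_eq {α : Type} (key : α → Int) (x : α) (ys : List α)
    (hys : ys.Pairwise (fun a b => key b ≤ key a)) :
    (PySem.List.insertBy (fun a b => decide (key b < key a)) x ys).filter
        (fun z => key z == key x) =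
      ys.filter (fun z => key z == key x) ++ [x] := by
  induction ys with
  | nil => simp [PySem.List.insertBy]
  | cons y ys ih =>
    rw [PySem.List.insertBy]
    split_ifs with h
    · -- key y < key x : everything from y on is < key x, so the old filter is empty
      simp only [decide_eq_true_eq] at h
      have hnil : (y :: ys).filter (fun z => key z == key x) = [] := by
        rw [List.filter_eq_nil_iff]
        intro z hz
        have hzy : key z ≤ key y := by
          rcases List.mem_cons.mp hz with hz | hz
          · subst hz; exact le_refl _
          · exact (List.pairwise_cons.mp hys).1 z hz
        simp; omega
      simp [List.filter_cons, hnil]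
    · simp only [decide_eq_true_eq, not_lt] at h
      by_cases hy : key y = key x
      · simp [List.filter_cons, hy, ih (List.pairwise_cons.mp hys).2]
      · simp [List.filter_cons, hy, ih (List.pairwise_cons.mp hys).2]

theorem pv_pairwise_insertBy {α : Type} (key : α → Int) (x : α) (ys : List α)
    (hys : ys.Pairwise (fun a b => key b ≤ key a)) :
    (PySem.List.insertBy (fun a b => decide (key b < key a)) x ys).Pairwise
      (fun a b => key b ≤ key a) := by
  induction ys with
  | nil => simp [PySem.List.insertBy]
  | cons y ys ih =>
    rw [PySem.List.insertBy]
    rcases List.pairwise_cons.mp hys with ⟨hy, htail⟩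
    split_ifs with h
    · simp only [decide_eq_true_eq] at h
      refine List.pairwise_cons.mpr ⟨?_, hys⟩
      intro z hz
      rcases List.mem_cons.mp hz with hz | hz
      · subst hz; omega
      · have := hy z hz; omega
    · simp only [decide_eq_true_eq, not_lt] at h
      refine List.pairwise_cons.mpr ⟨?_, ih htail⟩
      intro z hz
      rcases (PySem.List.mem_insertBy _ x z ys).mp hz with hz | hz
      · exact hz ▸ h
      · exact hy z hz

theorem pv_filter_foldl_insertBy {α : Type} (key : α → Int) (c : Int) (l : List α) :
    ∀ acc : List α, acc.Pairwise (fun a b => key b ≤ key a) →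
      (l.foldl (fun acc x => PySem.List.insertBy (fun a b => decide (key b < key a)) x acc) acc).filter
          (fun z => key z == c) =
        acc.filter (fun z => key z == c) ++ l.filter (fun z => key z == c) := by
  induction l with
  | nil => intro acc _; simp
  | cons x l ih =>
    intro acc hacc
    rw [List.foldl_cons, ih _ (pv_pairwise_insertBy key x acc hacc)]
    by_cases hx : key x = c
    · have hrw := pv_filter_insertBy_eq key x acc hacc
      rw [hx] at hrw
      rw [hrw]
      simp [List.filter_cons, hx]
    · rw [pv_filter_insertBy_ne key c x acc hx]
      simp [List.filter_cons, hx]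

-- stable descending sort keeps each key-group in original order
theorem pv_filter_sorted {α : Type} (key : α → Int) (c : Int) (xs : List α) :
    (PySem.List.sorted xs key true).filter (fun z => key z == c) =
      xs.filter (fun z => key z == c) := by
  rw [PySem.List.sorted_rev_eq_foldl_insertBy]
  simpa using pv_filter_foldl_insertBy key c xs [] (by simp)

-- A on a nonempty vector: the elements whose difference equals c := head key of the sorted list
theorem pvA_filter (t : List Int × List Int) (rest : List (List Int × List Int))
    {m : (List Int × List Int) × Int} {tl : List ((List Int × List Int) × Int)}
    (hs : PySem.List.sorted ((t :: rest).map (fun u => (u, pvDiff u))) (fun x => x.2) true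
            = m :: tl) :
    buscar_parejas_mayor_valor (t :: rest)
      = (t :: rest).filter (fun u => pvDiff u == m.2) := by
  unfold buscar_parejas_mayor_valor
  rw [PySem.List.foldl_append_singleton_eq_map (fun u => (u, pvDiff u)) (t :: rest) [],
      List.nil_append, hs]
  show ((m :: tl).filter (fun x => x.2 == m.2)).map (fun x => x.1)
        = (t :: rest).filter (fun u => pvDiff u == m.2)
  rw [← hs,
      pv_filter_sorted (fun z => z.2) m.2 ((t :: rest).map (fun u => (u, pvDiff u))),
      List.filter_map, List.map_map]
  simp [Function.comp_def]

-- the head key of A's sorted pair list is B's running maximum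
theorem pv_head_eq_max (t : List Int × List Int) (rest : List (List Int × List Int))
    {m : (List Int × List Int) × Int} {tl : List ((List Int × List Int) × Int)}
    (hs : PySem.List.sorted ((t :: rest).map (fun u => (u, pvDiff u))) (fun x => x.2) true
            = m :: tl) :
    m.2 = pvMax rest (pvDiff t) := by
  have hub : ∀ y ∈ (t :: rest).map (fun u => (u, pvDiff u)), y.2 ≤ m.2 :=
    PySem.List.key_head_sorted_rev_ge ((t :: rest).map (fun u => (u, pvDiff u)))
      (fun x : (List Int × List Int) × Int => x.2) hs
  have hub' : ∀ u ∈ t :: rest, pvDiff u ≤ m.2 := by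
    intro u hu
    exact hub (u, pvDiff u) (List.mem_map.mpr ⟨u, hu, rfl⟩)
  have hmem : m ∈ (t :: rest).map (fun u => (u, pvDiff u)) :=
    (PySem.List.mem_sorted _ _ _ _).mp (hs ▸ List.mem_cons_self)
  obtain ⟨u, hu, hum⟩ := List.mem_map.mp hmem
  have hm2 : m.2 = pvDiff u := by rw [← hum]
  apply le_antisymm
  · -- m.2 is some element's difference, hence ≤ the running maximum
    rw [hm2]
    rcases List.mem_cons.mp hu with h | h
    · subst h; exact (pvMax_bounds rest (pvDiff u)).1
    · exact (pvMax_bounds rest (pvDiff t)).2 u h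
  · -- the running maximum is attained by some element, hence ≤ m.2
    rcases pvMax_attained rest (pvDiff t) with h | ⟨v, hv, hveq⟩
    · rw [h]; exact hub' t List.mem_cons_self
    · rw [hveq]; exact hub' v (List.mem_cons_of_mem _ hv)

-- ===== VERDICT (by name: the statement is the Claim_ definition above) =====
theorem buscar_parejas_mayor_valor_spec : Claim_equal_buscar_parejas_mayor_valor := by
  intro vector _ hpre
  obtain ⟨hne, -⟩ := hpre
  unfold Spec_buscar_parejas_mayor_valor
  cases vector with
  | nil => exact absurd rfl hne
  | cons t rest =>
    obtain ⟨m, tl, hs⟩ :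
        ∃ m tl, PySem.List.sorted ((t :: rest).map (fun u => (u, pvDiff u))) (fun x => x.2) true
                  = m :: tl := by
      cases h : PySem.List.sorted ((t :: rest).map (fun u => (u, pvDiff u))) (fun x => x.2) true with
      | nil => rw [PySem.List.sorted_eq_nil_iff] at h; simp at h
      | cons m tl => exact ⟨m, tl, rfl⟩
    rw [pvA_filter t rest hs, pv_head_eq_max t rest hs]
    show (t :: rest).filter (fun u => pvDiff u == pvMax rest (pvDiff t))
          = buscar_parejas_mayor_valor_alt (t :: rest)
    rw [show buscar_parejas_mayor_valor_alt (t :: rest) = pvAltLoop rest (pvDiff t) [t] from rfl,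
        pvAltLoop_char rest (pvDiff t) [t]]
    by_cases h0 : pvMax rest (pvDiff t) = pvDiff t
    · have ht : (pvDiff t == pvMax rest (pvDiff t)) = true := by simp [h0]
      simp [ht, h0]
    · have hle : pvDiff t ≤ pvMax rest (pvDiff t) := (pvMax_bounds rest (pvDiff t)).1
      have ht : (pvDiff t == pvMax rest (pvDiff t)) = false := by simp; omega
      simp [ht, h0]
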